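-- pv_equiv track=rewrite | github.com/anderthel/cryptographypuzzletools | handlers/text_simple.py | a1z26
-- ===== SOURCE A (Python) =====
-- def a1z26(text, encode=True, steps=0):		# No space + number support + Uppercase + no steps
-- 	inkey = {
-- 		"a": "1", "b": "2", "c": "3", "d": "4", "e": "5", "f": "6", "g": "7", "h": "8", "i": "9", "j": "10", "k": "11", "l": "12", "m": "13", "n": "14", "o": "15", "p": "16", "q": "17", "r": "18",
-- 		"s": "19", "t": "20", "u": "21", "v": "22", "w": "23", "x": "24", "y": "25", "z": "26"
-- 	}
-- 	outkey = {
-- 		"1": "a", "2": "b", "3": "c", "4": "d", "5": "e", "6": "f", "7": "g", "8": "h", "9": "i", "10": "j", "11": "k", "12": "l", "13": "m", "14": "n", "15": "o", "16": "p", "17": "q", "18": "r",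
-- 		"19": "s", "20": "t", "21": "u", "22": "v", "23": "w", "24": "x", "25": "y", "26": "z"
-- 	}
-- 	output = ""
--
-- 	if encode:
-- 		for char in text:
-- 			if char in inkey:
-- 				output += f"{inkey[char]} "
-- 			else:
-- 				output += f"{char} "
-- 		return output[:-1], steps
-- 	else:
-- 		for char in text.split():
-- 			if char in outkey:
-- 				output += f"{outkey[char]}"
-- 			else:
-- 				output += f"{char}"
-- 		return output, steps
-- ===== SOURCE B (Python) =====
-- _ENC = str.maketrans({chr(96 + i): str(i) for i in range(1, 27)})
--
--
-- def _dec(t):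
--     try:
--         n = int(t)
--     except ValueError:
--         return t
--     return chr(n + 96) if 1 <= n <= 26 and str(n) == t else t
--
--
-- def a1z26(text, encode=True, steps=0):
--     if encode:
--         return " ".join(text).translate(_ENC), steps
--     out = []
--     tok = ""
--     for ch in text:
--         if ch.isspace():
--             if tok:
--                 out.append(_dec(tok))
--                 tok = ""
--         else:
--             tok += ch
--     if tok:
--         out.append(_dec(tok))
--     return "".join(out), steps
-- ===== Notes on version B (the rewrite author's own statement) =====
-- stated objective: alternative
-- what changed: Encode becomes a staged, loop-free pipeline (space-join of the characters, then one str.translate pass over a letter-to-digits table) instead of A's accumulate-and-trim loop over a hard-coded dict; decode drops split() and the reverse dict entirely, scanning characters once with an explicit token buffer and validating each token by an int round-trip (parse, range-check 1..26, re-stringify and compare) instead of dict membership.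
import Mathlib
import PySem

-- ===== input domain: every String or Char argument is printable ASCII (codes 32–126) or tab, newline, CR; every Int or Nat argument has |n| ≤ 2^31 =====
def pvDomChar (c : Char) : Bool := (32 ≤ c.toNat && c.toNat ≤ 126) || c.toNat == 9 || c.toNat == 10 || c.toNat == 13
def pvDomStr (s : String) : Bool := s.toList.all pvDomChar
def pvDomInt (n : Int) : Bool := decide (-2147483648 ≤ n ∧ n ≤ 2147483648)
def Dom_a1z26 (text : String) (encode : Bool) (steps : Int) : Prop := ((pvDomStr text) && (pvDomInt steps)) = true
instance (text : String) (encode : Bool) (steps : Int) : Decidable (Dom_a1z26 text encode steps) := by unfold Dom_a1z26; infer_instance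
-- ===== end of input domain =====

-- B: encode = staged ' '.join(text) then one translate pass over a letter→digits table;
-- decode = single char-level scan with a token buffer (no split, no dict), int round-trip validation. Objective: alternative.

-- ===== PORT A =====
-- the literal 'inkey' dict: Python iterates a str giving 1-char strings, ported as Char keys
def pvInkey : PySem.Dict Char (List Char) := PySem.Dict.ofList [('a', ['1']), ('b', ['2']), ('c', ['3']), ('d', ['4']), ('e', ['5']), ('f', ['6']), ('g', ['7']), ('h', ['8']), ('i', ['9']), ('j', ['1', '0']), ('k', ['1', '1']), ('l', ['1', '2']), ('m', ['1', '3']), ('n', ['1', '4']), ('o', ['1', '5']), ('p', ['1', '6']), ('q', ['1', '7']), ('r', ['1', '8']), ('s', ['1', '9']), ('t', ['2', '0']), ('u', ['2', '1']), ('v', ['2', '2']), ('w', ['2', '3']), ('x', ['2', '4']), ('y', ['2', '5']), ('z', ['2', '6'])]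
-- the literal 'outkey' dict, keyed by the tokens of text.split()
def pvOutkey : PySem.Dict (List Char) (List Char) := PySem.Dict.ofList [(['1'], ['a']), (['2'], ['b']), (['3'], ['c']), (['4'], ['d']), (['5'], ['e']), (['6'], ['f']), (['7'], ['g']), (['8'], ['h']), (['9'], ['i']), (['1', '0'], ['j']), (['1', '1'], ['k']), (['1', '2'], ['l']), (['1', '3'], ['m']), (['1', '4'], ['n']), (['1', '5'], ['o']), (['1', '6'], ['p']), (['1', '7'], ['q']), (['1', '8'], ['r']), (['1', '9'], ['s']), (['2', '0'], ['t']), (['2', '1'], ['u']), (['2', '2'], ['v']), (['2', '3'], ['w']), (['2', '4'], ['x']), (['2', '5'], ['y']), (['2', '6'], ['z'])]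

def a1z26 (text : String) (encode : Bool) (steps : Int) : String × Int :=
  if encode then
    -- for char in text: output += f"{inkey[char]} " if char in inkey else f"{char} "
    let out := text.toList.foldl (fun out char =>
      out ++ (match pvInkey.get? char with
              | some v => v ++ [' ']
              | none   => [char] ++ [' '])) []
    (String.ofList (PySem.Chars.slice out none (some (-1))), steps)   -- output[:-1]
  else
    -- for char in text.split(): output += outkey[char] if char in outkey else char
    let out := (PySem.Chars.split₀ text.toList).foldl (fun out char =>
      out ++ (match pvOutkey.get? char with
              | some v => v
              | none   => char)) []
    (String.ofList out, steps)

-- ===== PORT B =====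
-- _ENC = str.maketrans({chr(96 + i): str(i) for i in range(1, 27)})
def pvEncTable : PySem.Dict Char (List Char) :=
  PySem.Dict.ofList ((PySem.List.pyRange 1 27 1).map (fun i => (Char.ofNat (96 + i).toNat, PySem.Int.toChars i)))

-- s.translate(table): each mapped char is replaced by its multi-char image, others kept (exact for this table)
def pvTranslate (table : PySem.Dict Char (List Char)) (s : List Char) : List Char :=
  s.flatMap (fun c => (table.get? c).getD [c])

-- _dec(t): try int(t) (ValueError → keep t); chr(n+96) if 1 <= n <= 26 and str(n) == t else t
def pvDec (t : List Char) : List Char :=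
  match PySem.Int.ofChars? t with
  | none => t
  | some n => if 1 ≤ n ∧ n ≤ 26 ∧ PySem.Int.toChars n = t then [Char.ofNat (n + 96).toNat] else t

-- the loop body: on whitespace flush the token buffer (if any), else extend it
def pvDecStep (st : List (List Char) × List Char) (ch : Char) : List (List Char) × List Char :=
  if PySem.Chars.isspace ch then
    (if st.2.isEmpty then (st.1, []) else (st.1 ++ [pvDec st.2], []))
  else (st.1, st.2 ++ [ch])

def a1z26_alt (text : String) (encode : Bool) (steps : Int) : String × Int :=
  if encode then
    -- " ".join(text).translate(_ENC)
    (String.ofList (pvTranslate pvEncTable (PySem.Chars.join [' '] (text.toList.map (fun c => [c])))), steps)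
  else
    -- char-level scan with token buffer, final flush, "".join(out)
    let st := text.toList.foldl pvDecStep ([], [])
    let out := if st.2.isEmpty then st.1 else st.1 ++ [pvDec st.2]
    (String.ofList (PySem.Chars.join [] out), steps)

-- ===== PRECONDITION & SPEC =====
def Spec_a1z26 (text : String) (encode : Bool) (steps : Int) (out : String × Int) : Prop := out = a1z26_alt text encode steps
instance (text : String) (encode : Bool) (steps : Int) (out : String × Int) : Decidable (Spec_a1z26 text encode steps out) := by unfold Spec_a1z26; infer_instance

-- ===== CLAIM =====
def Claim_equal_a1z26 : Prop := ∀ (text : String) (encode : Bool) (steps : Int), Dom_a1z26 text encode steps → Spec_a1z26 text encode steps (a1z26 text encode steps)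

-- ===== LEMMAS AND PROOFS =====

-- the keys of outkey, as a plain list
def pvL : List (List Char) := [['1'], ['2'], ['3'], ['4'], ['5'], ['6'], ['7'], ['8'], ['9'], ['1', '0'], ['1', '1'], ['1', '2'], ['1', '3'], ['1', '4'], ['1', '5'], ['1', '6'], ['1', '7'], ['1', '8'], ['1', '9'], ['2', '0'], ['2', '1'], ['2', '2'], ['2', '3'], ['2', '4'], ['2', '5'], ['2', '6']]

lemma pvSliceDropLast (xs : List Char) :
    PySem.Chars.slice xs none (some (-1)) = xs.dropLast := by
  cases xs with
  | nil => rfl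
  | cons c t =>
    simp only [PySem.Chars.slice_eq_listSlice, PySem.List.slice, PySem.List.clampIdx,
      List.dropLast_eq_take, List.drop_zero, List.length_cons]
    rw [if_pos (by norm_num), if_neg (by push_cast; omega)]
    congr 1
    push_cast
    omega

lemma pvJoinEmpty (ps : List (List Char)) :
    PySem.Chars.join [] ps = ps.flatMap id := by
  induction ps with
  | nil => simp [PySem.Chars.join_nil]
  | cons p ps ih =>
    cases ps with
    | nil => simp [PySem.Chars.join_singleton]
    | cons q r =>
      rw [PySem.Chars.join_cons_cons, ih]
      simp [List.flatMap_cons]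

-- encode, per character below 127: A's dict branch (with the trailing space) = B's translate image + space
set_option maxRecDepth 8192 in
lemma pvEncCharFin : ∀ n : Fin 127,
    (match pvInkey.get? (Char.ofNat n.val) with
     | some v => v ++ [' ']
     | none   => [Char.ofNat n.val] ++ [' ']) =
    ((pvEncTable.get? (Char.ofNat n.val)).getD [Char.ofNat n.val]) ++ [' '] := by
  decide

lemma pvEncChar (c : Char) (h : pvDomChar c = true) :
    (match pvInkey.get? c with
     | some v => v ++ [' ']
     | none   => [c] ++ [' ']) = ((pvEncTable.get? c).getD [c]) ++ [' '] := by
  have h127 : c.toNat < 127 := by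
    simp only [pvDomChar, Bool.or_eq_true, Bool.and_eq_true, decide_eq_true_eq, beq_iff_eq] at h
    omega
  have := pvEncCharFin ⟨c.toNat, h127⟩
  simpa [Char.ofNat_toNat] using this

-- encode, list level: A's flatMap-with-trailing-space, trimmed, = B's translate of the space-joined chars
lemma pvJoinSpace (g tr : Char → List Char) (hsp : tr ' ' = [' ']) :
    ∀ cs : List Char, (∀ c ∈ cs, tr c = g c) →
      (cs.flatMap (fun c => g c ++ [' '])).dropLast =
      (PySem.Chars.join [' '] (cs.map (fun c => [c]))).flatMap tr := by
  intro cs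
  induction cs with
  | nil => intro _; simp [PySem.Chars.join_nil]
  | cons c cs ih =>
    intro hall
    cases cs with
    | nil =>
      simp [PySem.Chars.join_singleton, List.flatMap_cons, hall c (by simp)]
    | cons d r =>
      have hne : (d :: r).flatMap (fun c => g c ++ [' ']) ≠ [] := by
        simp [List.flatMap_cons]
      have ih' := ih (fun x hx => hall x (by simp [hx]))
      rw [List.map_cons] at ih'
      rw [List.flatMap_cons, List.dropLast_append_of_ne_nil hne, ih']
      simp [PySem.Chars.join_cons_cons, hsp, hall c (by simp)]

-- the canonical numerals 1..26 are exactly the outkey keys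
set_option maxRecDepth 8192 in
lemma pvCanon : ∀ m : Fin 27, 1 ≤ m.val → PySem.Int.toChars (m.val : Int) ∈ pvL := by decide

set_option maxRecDepth 8192 in
lemma pvItems : pvOutkey.items = [(['1'], ['a']), (['2'], ['b']), (['3'], ['c']), (['4'], ['d']), (['5'], ['e']), (['6'], ['f']), (['7'], ['g']), (['8'], ['h']), (['9'], ['i']), (['1', '0'], ['j']), (['1', '1'], ['k']), (['1', '2'], ['l']), (['1', '3'], ['m']), (['1', '4'], ['n']), (['1', '5'], ['o']), (['1', '6'], ['p']), (['1', '7'], ['q']), (['1', '8'], ['r']), (['1', '9'], ['s']), (['2', '0'], ['t']), (['2', '1'], ['u']), (['2', '2'], ['v']), (['2', '3'], ['w']), (['2', '4'], ['x']), (['2', '5'], ['y']), (['2', '6'], ['z'])] := by decide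

-- decode, per token: A's dict branch = B's int round-trip branch (for every token)
set_option maxRecDepth 8192 in
lemma pvDecEq (t : List Char) :
    (match pvOutkey.get? t with | some v => v | none => t) = pvDec t := by
  by_cases hm : t ∈ pvL
  · simp only [pvL, List.mem_cons, List.not_mem_nil, or_false] at hm
    rcases hm with rfl | rfl | rfl | rfl | rfl | rfl | rfl | rfl | rfl | rfl | rfl | rfl | rfl | rfl | rfl | rfl | rfl | rfl | rfl | rfl | rfl | rfl | rfl | rfl | rfl | rfl <;> decide
  · have hnone : pvOutkey.get? t = none := by
      cases hg : pvOutkey.get? t with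
      | none => rfl
      | some v =>
        exfalso
        unfold PySem.Dict.get? at hg
        rcases Option.map_eq_some_iff.mp hg with ⟨p, hfind, hv⟩
        have hp1 := List.find?_some hfind
        simp only [beq_iff_eq] at hp1
        have hmem : p ∈ pvOutkey.items := List.mem_of_find?_eq_some hfind
        rw [pvItems] at hmem
        simp only [List.mem_cons, List.not_mem_nil, or_false] at hmem
        rcases hmem with rfl | rfl | rfl | rfl | rfl | rfl | rfl | rfl | rfl | rfl | rfl | rfl | rfl | rfl | rfl | rfl | rfl | rfl | rfl | rfl | rfl | rfl | rfl | rfl | rfl | rfl <;>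
          (simp only at hp1; subst hp1; exact hm (by decide))
    rw [hnone]
    show t = pvDec t
    unfold pvDec
    cases hof : PySem.Int.ofChars? t with
    | none => rfl
    | some n =>
      show t = if 1 ≤ n ∧ n ≤ 26 ∧ PySem.Int.toChars n = t then [Char.ofNat (n + 96).toNat] else t
      rw [if_neg]
      rintro ⟨h1, h2, h3⟩
      have hn : ((n.toNat : Nat) : Int) = n := Int.toNat_of_nonneg (by omega)
      have hfin : n.toNat < 27 := by omega
      have := pvCanon ⟨n.toNat, hfin⟩ (by simp only; omega)
      simp only at this
      rw [hn, h3] at this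
      exact hm this

-- the accumulator of split₀.go is a prefix of the result
lemma pvGoAcc : ∀ (cs : List Char) (cur : List Char) (acc : List (List Char)),
    PySem.Chars.split₀.go cs cur acc = acc.reverse ++ PySem.Chars.split₀.go cs cur [] := by
  intro cs
  induction cs with
  | nil =>
    intro cur acc
    rw [PySem.Chars.split₀.go.eq_def, PySem.Chars.split₀.go.eq_def]
    by_cases h : cur.isEmpty <;> simp [h]
  | cons c rest ih =>
    intro cur acc
    rw [PySem.Chars.split₀.go.eq_def]
    conv_rhs => rw [PySem.Chars.split₀.go.eq_def]
    by_cases hs : PySem.Chars.isspace c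
    · by_cases hc : cur.isEmpty
      · simp only [hs, hc, if_true]
        exact ih [] acc
      · simp only [hs, hc, if_true, Bool.false_eq_true, if_false]
        rw [ih [] (cur.reverse :: acc), ih [] [cur.reverse]]
        simp
    · simp only [hs, Bool.false_eq_true, if_false]
      exact ih (c :: cur) acc

-- B's char-level scan computes pvDec of each word of split₀, in order
lemma pvKey : ∀ (cs : List Char) (out : List (List Char)) (tok : List Char),
    (let st := cs.foldl pvDecStep (out, tok);
     if st.2.isEmpty then st.1 else st.1 ++ [pvDec st.2]) =
    out ++ (PySem.Chars.split₀.go cs tok.reverse []).map pvDec := by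
  intro cs
  induction cs with
  | nil =>
    intro out tok
    rw [PySem.Chars.split₀.go.eq_def]
    by_cases h : tok.isEmpty
    · have : tok = [] := List.isEmpty_iff.mp h
      subst this
      simp
    · have hr : tok.reverse.isEmpty = false := by
        simp only [List.isEmpty_eq_false_iff] at h ⊢
        simpa using h
      simp [h, hr]
  | cons c rest ih =>
    intro out tok
    rw [PySem.Chars.split₀.go.eq_def]
    by_cases hs : PySem.Chars.isspace c
    · by_cases hc : tok.isEmpty
      · have : tok = [] := List.isEmpty_iff.mp hc
        subst this
        simp only [List.foldl_cons, pvDecStep, hs, if_true, List.isEmpty_nil,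
          List.reverse_nil]
        exact ih out []
      · have hr : tok.reverse.isEmpty = false := by
          simp only [List.isEmpty_eq_false_iff] at hc ⊢
          simpa using hc
        simp only [List.foldl_cons, pvDecStep, hs, if_true, hc, Bool.false_eq_true, if_false,
          hr, List.reverse_reverse]
        rw [ih (out ++ [pvDec tok]) [], pvGoAcc rest [] [tok]]
        simp
    · simp only [List.foldl_cons, pvDecStep, hs, Bool.false_eq_true, if_false]
      rw [ih out (tok ++ [c])]
      simp only [List.reverse_append, List.reverse_cons, List.reverse_nil, List.nil_append,
        List.singleton_append]

lemma pvFlatMapCongr {α β : Type} {l : List α} {f g : α → List β}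
    (h : ∀ a ∈ l, f a = g a) : l.flatMap f = l.flatMap g := by
  induction l with
  | nil => rfl
  | cons x xs ih =>
    simp only [List.flatMap_cons, h x (by simp), ih (fun a ha => h a (by simp [ha]))]

-- ===== VERDICT =====
theorem a1z26_spec : Claim_equal_a1z26 := by
  intro text encode steps hdom
  have hall : ∀ c ∈ text.toList, pvDomChar c = true := by
    have hs : pvDomStr text = true := ((Bool.and_eq_true _ _).mp hdom).1
    simpa [pvDomStr, List.all_eq_true] using hs
  unfold Spec_a1z26 a1z26 a1z26_alt
  cases encode with
  | true =>
    simp only [if_true]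
    have hlist : PySem.Chars.slice (text.toList.foldl (fun out char =>
        out ++ (match pvInkey.get? char with
                | some v => v ++ [' ']
                | none   => [char] ++ [' '])) []) none (some (-1)) =
        pvTranslate pvEncTable (PySem.Chars.join [' '] (text.toList.map (fun c => [c]))) := by
      rw [PySem.List.foldl_append_eq_flatMap, List.nil_append, pvSliceDropLast]
      rw [pvFlatMapCongr (fun c hc => pvEncChar c (hall c hc))]
      exact pvJoinSpace (fun c => (pvEncTable.get? c).getD [c])
        (fun c => (pvEncTable.get? c).getD [c]) (by decide) text.toList (fun _ _ => rfl)
    rw [hlist]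
  | false =>
    simp only [Bool.false_eq_true, if_false]
    have hlist : (PySem.Chars.split₀ text.toList).foldl (fun out char =>
        out ++ (match pvOutkey.get? char with
                | some v => v
                | none   => char)) [] =
        PySem.Chars.join []
          (let st := text.toList.foldl pvDecStep ([], []);
           if st.2.isEmpty then st.1 else st.1 ++ [pvDec st.2]) := by
      rw [pvKey text.toList [] []]
      rw [PySem.List.foldl_append_eq_flatMap, List.nil_append, pvJoinEmpty]
      simp only [List.nil_append, List.reverse_nil]
      show (PySem.Chars.split₀ text.toList).flatMap _ = _
      rw [show PySem.Chars.split₀ text.toList = PySem.Chars.split₀.go text.toList [] [] from rfl]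
      rw [List.flatMap_map]
      simp only [id_eq]
      exact pvFlatMapCongr (fun t _ => pvDecEq t)
    rw [hlist]
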